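-- pv_equiv track=rewrite | github.com/jpcind/codingbat | alarm_clock.py | alarm_clock
-- ===== SOURCE A (Python) =====
-- def alarm_clock(day, vacation):
--     weekend = [0,6]
--     weekday = []
--     for i in range(1,6):
--         weekday.append(i)
--
--     if vacation:
--         if day in weekend:
--             return "off"
--         if day in weekday:
--             return "10:00"
--     else:
--         if day in weekday:
--             return "7:00"
--         if day in weekend:
--             return "10:00"
-- ===== SOURCE B (Python) =====
-- def alarm_clock(day, vacation):
--     schedule = {
--         0: ("off", "10:00"),
--         1: ("10:00", "7:00"),
--         2: ("10:00", "7:00"),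
--         3: ("10:00", "7:00"),
--         4: ("10:00", "7:00"),
--         5: ("10:00", "7:00"),
--         6: ("off", "10:00"),
--     }
--     if day in schedule:
--         off, on = schedule[day]
--         return off if vacation else on
-- ===== Notes on version B (the rewrite author's own statement) =====
-- stated objective: simpler
-- what changed: Replaces the weekday-list building loop and the four membership branches with a single table keyed 0..6 mapping each day to its (vacation, non-vacation) answer pair, followed by one lookup and one select. Pre_ excludes days outside 0..6, where A falls through and returns None, which is not a string.
-- outside the precondition, e.g. on alarm_clock(7, True): A returns None, B returns None; on alarm_clock(-1, False): A returns None, B returns None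
import Mathlib
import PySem

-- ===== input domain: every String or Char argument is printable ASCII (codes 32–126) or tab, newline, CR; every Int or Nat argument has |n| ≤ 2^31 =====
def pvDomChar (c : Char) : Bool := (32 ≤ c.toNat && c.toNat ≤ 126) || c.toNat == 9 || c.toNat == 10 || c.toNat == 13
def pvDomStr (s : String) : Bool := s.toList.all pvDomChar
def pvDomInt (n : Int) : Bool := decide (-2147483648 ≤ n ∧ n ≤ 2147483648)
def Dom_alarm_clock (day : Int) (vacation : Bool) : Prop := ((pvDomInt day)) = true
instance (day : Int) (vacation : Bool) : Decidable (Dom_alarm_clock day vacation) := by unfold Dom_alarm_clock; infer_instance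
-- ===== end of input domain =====

-- B replaces the weekday-loop and membership branches with one table keyed 0..6 and a single
-- vacation select (objective: simpler). Pre_ excludes days outside 0..6, where A falls through
-- and returns None (not a string).
-- ===== PORT A =====
def alarm_clock (day : Int) (vacation : Bool) : String :=
  let weekend : List Int := [0, 6]
  let weekday : List Int := (PySem.List.pyRange 1 6 1).foldl (fun acc i => acc ++ [i]) []
  if vacation then
    if weekend.contains day then "off"
    else if weekday.contains day then "10:00"
    else ""  -- unreachable under Pre_: Python returns None here
  else
    if weekday.contains day then "7:00"
    else if weekend.contains day then "10:00"
    else ""  -- unreachable under Pre_: Python returns None here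

-- ===== PORT B =====
def alarm_clock_alt (day : Int) (vacation : Bool) : String :=
  let schedule : PySem.Dict Int (String × String) := PySem.Dict.ofList
    [(0, ("off", "10:00")), (1, ("10:00", "7:00")), (2, ("10:00", "7:00")),
     (3, ("10:00", "7:00")), (4, ("10:00", "7:00")), (5, ("10:00", "7:00")),
     (6, ("off", "10:00"))]
  match schedule.get? day with
  | some (off, on) => if vacation then off else on
  | none => ""  -- unreachable under Pre_: Python returns None here

-- ===== PRECONDITION & SPEC =====
-- Pre_ excludes days outside 0..6: there A falls through and returns None, not a string.
def Pre_alarm_clock (day : Int) (vacation : Bool) : Prop := 0 ≤ day ∧ day ≤ 6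
instance (day : Int) (vacation : Bool) : Decidable (Pre_alarm_clock day vacation) := by
  unfold Pre_alarm_clock; infer_instance
def pvWitness_alarm_clock : Int × Bool := (3, true)
def Spec_alarm_clock (day : Int) (vacation : Bool) (out : String) : Prop := out = alarm_clock_alt day vacation
instance (day : Int) (vacation : Bool) (out : String) : Decidable (Spec_alarm_clock day vacation out) := by unfold Spec_alarm_clock; infer_instance

-- ===== CLAIM (what is proved, stated in full; the proofs are below) =====
def Claim_equal_alarm_clock : Prop := ∀ (day : Int) (vacation : Bool), Dom_alarm_clock day vacation → Pre_alarm_clock day vacation → Spec_alarm_clock day vacation (alarm_clock day vacation)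

-- ===== LEMMAS AND PROOFS =====

-- ===== VERDICT (by name: the statement is the Claim_ definition above) =====
theorem alarm_clock_spec : Claim_equal_alarm_clock := by
  intro day vacation _ hpre
  obtain ⟨h0, h6⟩ := hpre
  unfold Spec_alarm_clock
  interval_cases day <;> cases vacation <;> decide
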